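-- pv_equiv track=rewrite | github.com/MichaelLui7/ClockwiseSweepPolygon | Connected_Graph_2nd.py | is_same_hamilton_cycle
-- ===== SOURCE A (Python) =====
-- def is_same_hamilton_cycle(list1, list2):
--     # Check if two lists are the same up to rotation or reversal
--     if sorted(list1) != sorted(list2):
--         return False
--
--     n = len(list1)
--     # Check reversal
--     if list1 == list2[::-1]:
--         return True
--     for i in range(n):
--         # Check rotation
--         if list1 == list2[i:] + list2[:i]:
--             return True
--     return False
-- ===== SOURCE B (Python) =====
-- def _kmp_failure(p):
--     # longest proper border of each prefix of p
--     f = [0] * len(p)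
--     k = 0
--     for i in range(1, len(p)):
--         while k > 0 and p[i] != p[k]:
--             k = f[k - 1]
--         if p[i] == p[k]:
--             k += 1
--         f[i] = k
--     return f
--
--
-- def _kmp_contains(p, t):
--     # does pattern p occur as a contiguous block of t? (KMP, linear)
--     f = _kmp_failure(p)
--     m = len(p)
--     k = 0
--     for c in t:
--         while k > 0 and c != p[k]:
--             k = f[k - 1]
--         if c == p[k]:
--             k += 1
--         if k == m:
--             return True
--     return False
--
--
-- def is_same_hamilton_cycle(list1, list2):
--     # Same cycle up to rotation or exact reversal.  Rotation test done as a
--     # single KMP substring search of list1 inside list2 + list2 (classic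
--     # rotation <-> substring-of-doubled-list reduction), instead of comparing
--     # against every rotation.  Reversal compare kept.
--     n = len(list1)
--     if n != len(list2):
--         return False
--     if list1 == list2[::-1]:
--         return True
--     return _kmp_contains(list1, list2 + list2)
-- ===== Notes on version B (the rewrite author's own statement) =====
-- stated objective: faster
-- what changed: B replaces A's sort-both-lists gate and per-index rotated-copy comparisons by a length gate plus one KMP substring search of list1 inside list2+list2 (rotation <-> substring-of-doubled-list reduction), keeping the reversal compare.
import Mathlib
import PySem

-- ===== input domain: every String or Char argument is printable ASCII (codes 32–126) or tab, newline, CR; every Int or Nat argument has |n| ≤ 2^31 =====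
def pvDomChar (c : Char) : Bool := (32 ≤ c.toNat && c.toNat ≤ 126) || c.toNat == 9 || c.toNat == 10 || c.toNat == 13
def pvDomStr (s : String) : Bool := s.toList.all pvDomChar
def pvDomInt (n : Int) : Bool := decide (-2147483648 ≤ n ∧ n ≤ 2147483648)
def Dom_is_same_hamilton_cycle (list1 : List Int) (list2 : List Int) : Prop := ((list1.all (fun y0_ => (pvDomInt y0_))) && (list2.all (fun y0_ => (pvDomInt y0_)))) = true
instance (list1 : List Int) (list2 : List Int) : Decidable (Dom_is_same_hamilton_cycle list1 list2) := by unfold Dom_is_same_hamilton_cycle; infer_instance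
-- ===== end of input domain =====

-- B replaces A's sorted-gate plus per-index rotated-copy comparisons by one KMP substring
-- search of list1 inside list2 ++ list2 (rotation ↔ substring-of-doubled-list), keeping the
-- reversal compare (objective: faster; same return value).

-- ===== PORT A =====
-- A: sorted(list1) != sorted(list2) gate, reversal compare, then for i in range(n): list1 == list2[i:] + list2[:i]
def is_same_hamilton_cycle (list1 : List Int) (list2 : List Int) : Bool :=
  if PySem.List.sorted list1 (fun x => x) false ≠ PySem.List.sorted list2 (fun x => x) false then
    false
  else
    let n : Int := list1.length
    if list1 == (PySem.List.slice? list2 none none (-1)).getD [] then  -- list2[::-1]; step -1 ≠ 0 so never none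
      true
    else
      (PySem.List.pyRange 0 n 1).any (fun i =>
        list1 == PySem.List.slice list2 (some i) none ++ PySem.List.slice list2 none (some i))

-- ===== PORT B =====
-- the `while k > 0 and c != p[k]: k = f[k-1]` loop of Source B; fuel = current k always suffices
-- because the failure table satisfies f[k-1] < k (proved below), so the fuel-out branch is unreachable
def pvKmpDrop (p : List Int) (f : List Nat) (c : Int) : Nat → Nat → Nat
  | 0, k => k
  | fuel+1, k => if 0 < k ∧ c ≠ p.getD k 0 then pvKmpDrop p f c fuel (f.getD (k-1) 0) else k

-- body of the `for i in range(1, len(p))` loop of _kmp_failure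
def pvKmpFailStep (p : List Int) (st : List Nat × Nat) (i : Nat) : List Nat × Nat :=
  let k1 := pvKmpDrop p st.1 (p.getD i 0) st.2 st.2
  let k2 := if p.getD i 0 = p.getD k1 0 then k1 + 1 else k1
  (st.1.set i k2, k2)

-- _kmp_failure: f = [0]*len(p); k = 0; loop over range(1, len(p))
def pvKmpFailure (p : List Int) : List Nat :=
  ((List.range' 1 (p.length - 1)).foldl (pvKmpFailStep p) (List.replicate p.length 0, 0)).1

-- body of the `for c in t` loop of _kmp_contains (found-flag models Python's early return)
def pvKmpSearchStep (p : List Int) (f : List Nat) (st : Bool × Nat) (c : Int) : Bool × Nat :=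
  if st.1 then st
  else
    let k1 := pvKmpDrop p f c st.2 st.2
    let k2 := if c = p.getD k1 0 then k1 + 1 else k1
    if k2 = p.length then (true, k2) else (false, k2)

def pvKmpContains (p t : List Int) : Bool :=
  let f := pvKmpFailure p
  (t.foldl (pvKmpSearchStep p f) (false, 0)).1

def is_same_hamilton_cycle_alt (list1 : List Int) (list2 : List Int) : Bool :=
  let n := list1.length
  if n ≠ list2.length then false
  else if list1 == (PySem.List.slice? list2 none none (-1)).getD [] then true  -- list2[::-1]
  else pvKmpContains list1 (list2 ++ list2)

-- ===== PRECONDITION & SPEC =====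
def Spec_is_same_hamilton_cycle (list1 : List Int) (list2 : List Int) (out : Bool) : Prop := out = is_same_hamilton_cycle_alt list1 list2
instance (list1 : List Int) (list2 : List Int) (out : Bool) : Decidable (Spec_is_same_hamilton_cycle list1 list2 out) := by unfold Spec_is_same_hamilton_cycle; infer_instance

-- ===== CLAIM (what is proved, stated in full; the proofs are below) =====
def Claim_equal_is_same_hamilton_cycle : Prop := ∀ (list1 : List Int) (list2 : List Int), Dom_is_same_hamilton_cycle list1 list2 → Spec_is_same_hamilton_cycle list1 list2 (is_same_hamilton_cycle list1 list2)

-- ===== LEMMAS AND PROOFS =====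

-- longest proper border length of p.take n (the spec of the KMP failure table)
def pvMB (p : List Int) (n : Nat) : Nat :=
  Nat.findGreatest (fun j => j < n ∧ p.take j <:+ p.take n) n

-- longest prefix of p that is a suffix of s (the spec of the KMP match counter)
def pvMu (p : List Int) (s : List Int) : Nat :=
  Nat.findGreatest (fun j => p.take j <:+ s) p.length

lemma pv_suffix_of_suffix_le {α : Type} {l1 l2 t : List α} (h1 : l1 <:+ t) (h2 : l2 <:+ t)
    (h : l1.length ≤ l2.length) : l1 <:+ l2 := by
  rw [← List.reverse_prefix] at h1 h2 ⊢
  exact List.prefix_of_prefix_length_le h1 h2 (by simpa using h)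

lemma pv_snoc_suffix {α : Type} (a b : List α) (x y : α) :
    a ++ [x] <:+ b ++ [y] ↔ a <:+ b ∧ x = y := by
  constructor
  · rintro ⟨u, hu⟩
    have h1 : (u ++ a) ++ [x] = b ++ [y] := by simpa [List.append_assoc] using hu
    obtain ⟨h2, h3⟩ := List.append_inj' h1 rfl
    exact ⟨⟨u, h2⟩, by simpa using h3⟩
  · rintro ⟨⟨u, hu⟩, rfl⟩
    exact ⟨u, by simp [← hu, List.append_assoc]⟩

lemma pv_take_succ_getD (p : List Int) (j : Nat) (hj : j < p.length) :
    p.take (j+1) = p.take j ++ [p.getD j 0] := by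
  rw [List.take_add_one, List.getElem?_eq_getElem hj, List.getD_eq_getElem _ _ hj]
  rfl

lemma pvMB_spec (p : List Int) (n : Nat) (hn : 0 < n) :
    pvMB p n < n ∧ p.take (pvMB p n) <:+ p.take n := by
  unfold pvMB
  exact Nat.findGreatest_spec (P := fun j => j < n ∧ p.take j <:+ p.take n)
    (Nat.zero_le n) ⟨hn, by simp⟩

lemma pvMB_le (p : List Int) (n j : Nat) (hj : j < n) (hs : p.take j <:+ p.take n) :
    j ≤ pvMB p n :=
  Nat.le_findGreatest (Nat.le_of_lt hj) ⟨hj, hs⟩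

lemma pvMu_le (p s : List Int) : pvMu p s ≤ p.length := Nat.findGreatest_le _

lemma pvMu_suffix (p s : List Int) : p.take (pvMu p s) <:+ s := by
  unfold pvMu
  exact Nat.findGreatest_spec (P := fun j => p.take j <:+ s) (Nat.zero_le _) (by simp)

lemma pvMu_ge (p s : List Int) (j : Nat) (hj : j ≤ p.length) (hs : p.take j <:+ s) :
    j ≤ pvMu p s :=
  Nat.le_findGreatest hj hs

-- the while-loop: result r is a prefix-suffix match length ≤ k, it stops only at 0 or on a
-- character match, and it skips no valid match length (maximality), given a correct failure table
lemma pvKmpDrop_spec (p : List Int) (f : List Nat) (c : Int) (s : List Int) :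
    ∀ fuel k, k ≤ fuel → k ≤ p.length → p.take k <:+ s →
    (∀ j, 0 < j → j ≤ k → f.getD (j-1) 0 = pvMB p j) →
    pvKmpDrop p f c fuel k ≤ k ∧ p.take (pvKmpDrop p f c fuel k) <:+ s ∧
      (pvKmpDrop p f c fuel k = 0 ∨ c = p.getD (pvKmpDrop p f c fuel k) 0) ∧
      (∀ j, j ≤ k → p.take j <:+ s → c = p.getD j 0 → j ≤ pvKmpDrop p f c fuel k) := by
  intro fuel
  induction fuel with
  | zero =>
    intro k hfuel _ hks _
    have hk0 : k = 0 := Nat.le_zero.mp hfuel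
    subst hk0
    exact ⟨le_rfl, hks, Or.inl rfl, fun j hj _ _ => hj⟩
  | succ fuel ih =>
    intro k hfuel hkp hks hf
    simp only [pvKmpDrop]
    by_cases hcond : 0 < k ∧ c ≠ p.getD k 0
    · rw [if_pos hcond]
      have hfk : f.getD (k-1) 0 = pvMB p k := hf k hcond.1 le_rfl
      have hmb := pvMB_spec p k hcond.1
      rw [hfk]
      have hrec := ih (pvMB p k) (by omega) (by omega) (hmb.2.trans hks)
        (fun j hj0 hjk => hf j hj0 (by omega))
      obtain ⟨ha, hb, hc', hd⟩ := hrec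
      refine ⟨by omega, hb, hc', ?_⟩
      intro j hj hjs hjc
      rcases Nat.lt_or_ge j k with hlt | hge
      · have hjsk : p.take j <:+ p.take k := by
          apply pv_suffix_of_suffix_le hjs hks
          simp only [List.length_take]
          omega
        exact hd j (pvMB_le p k j hlt hjsk) hjs hjc
      · have : j = k := by omega
        subst this
        exact absurd hjc hcond.2
    · rw [if_neg hcond]
      refine ⟨le_rfl, hks, ?_, fun j hj _ _ => hj⟩
      rcases Nat.eq_zero_or_pos k with h0 | hpos
      · exact Or.inl h0
      · right
        by_contra hne
        exact hcond ⟨hpos, hne⟩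

-- one full KMP step (while-loop then conditional increment): the new counter is exactly the
-- longest prefix of p that is a suffix of s ++ [c], among lengths ≤ k+1
lemma pvKmpStep_spec (p : List Int) (f : List Nat) (c : Int) (s : List Int) (k : Nat)
    (hk : k < p.length) (hks : p.take k <:+ s)
    (hf : ∀ j, 0 < j → j ≤ k → f.getD (j-1) 0 = pvMB p j) :
    (if c = p.getD (pvKmpDrop p f c k k) 0 then pvKmpDrop p f c k k + 1 else pvKmpDrop p f c k k) ≤ k + 1 ∧
    p.take (if c = p.getD (pvKmpDrop p f c k k) 0 then pvKmpDrop p f c k k + 1 else pvKmpDrop p f c k k) <:+ s ++ [c] ∧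
    (∀ j, j ≤ k + 1 → p.take j <:+ s ++ [c] →
      j ≤ (if c = p.getD (pvKmpDrop p f c k k) 0 then pvKmpDrop p f c k k + 1 else pvKmpDrop p f c k k)) := by
  obtain ⟨ha, hb, hc', hd⟩ := pvKmpDrop_spec p f c s k k le_rfl (le_of_lt hk) hks hf
  set r := pvKmpDrop p f c k k with hr
  by_cases hcr : c = p.getD r 0
  · simp only [if_pos hcr]
    have hrlt : r < p.length := lt_of_le_of_lt ha hk
    have htake : p.take (r+1) = p.take r ++ [c] := by
      rw [pv_take_succ_getD p r hrlt, ← hcr]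
    refine ⟨by omega, ?_, ?_⟩
    · rw [htake]
      exact (pv_snoc_suffix _ _ _ _).mpr ⟨hb, rfl⟩
    · intro j hj hjs
      rcases Nat.eq_zero_or_pos j with rfl | hjpos
      · omega
      · have hjm : j - 1 < p.length := by omega
        have hdecomp : p.take j = p.take (j-1) ++ [p.getD (j-1) 0] := by
          have := pv_take_succ_getD p (j-1) hjm
          rwa [Nat.sub_add_cancel hjpos] at this
        rw [hdecomp] at hjs
        obtain ⟨hsfx, hcv⟩ := (pv_snoc_suffix _ _ _ _).mp hjs
        have hle : j - 1 ≤ r := hd (j-1) (by omega) hsfx hcv.symm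
        omega
  · simp only [if_neg hcr]
    have hr0 : r = 0 := by
      rcases hc' with h | h
      · exact h
      · exact absurd h hcr
    refine ⟨by omega, by simp [hr0], ?_⟩
    intro j hj hjs
    rcases Nat.eq_zero_or_pos j with rfl | hjpos
    · omega
    · have hjm : j - 1 < p.length := by omega
      have hdecomp : p.take j = p.take (j-1) ++ [p.getD (j-1) 0] := by
        have := pv_take_succ_getD p (j-1) hjm
        rwa [Nat.sub_add_cancel hjpos] at this
      rw [hdecomp] at hjs
      obtain ⟨hsfx, hcv⟩ := (pv_snoc_suffix _ _ _ _).mp hjs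
      have hle : j - 1 ≤ r := hd (j-1) (by omega) hsfx hcv.symm
      have hj1 : j = 1 := by omega
      subst hj1
      simp only [Nat.sub_self] at hcv
      rw [hr0] at hcr
      exact absurd hcv.symm hcr

-- invariant of the failure-building fold after processing indices 1..i
def pvFInv (p : List Int) (i : Nat) (st : List Nat × Nat) : Prop :=
  st.1.length = p.length ∧ st.2 = pvMB p (i+1) ∧ ∀ j, j ≤ i → st.1.getD j 0 = pvMB p (j+1)

lemma pvFStep_inv (p : List Int) (i : Nat) (st : List Nat × Nat)
    (hinv : pvFInv p i st) (hi : i + 1 < p.length) :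
    pvFInv p (i+1) (pvKmpFailStep p st (i+1)) := by
  obtain ⟨hlen, hk, hentries⟩ := hinv
  have hi'pos : 0 < i + 1 := Nat.succ_pos i
  have hmb := pvMB_spec p (i+1) hi'pos
  have hkp : st.2 < p.length := by rw [hk]; omega
  have hks : p.take st.2 <:+ p.take (i+1) := by rw [hk]; exact hmb.2
  have hf : ∀ j, 0 < j → j ≤ st.2 → st.1.getD (j-1) 0 = pvMB p j := by
    intro j hj0 hjk
    have hji : j - 1 ≤ i := by rw [hk] at hjk; omega
    have := hentries (j-1) hji
    rwa [Nat.sub_add_cancel hj0] at this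
  obtain ⟨h1, h2, h3⟩ := pvKmpStep_spec p st.1 (p.getD (i+1) 0) (p.take (i+1)) st.2 hkp hks hf
  rw [← pv_take_succ_getD p (i+1) hi] at h2 h3
  simp only [pvKmpFailStep]
  set r := pvKmpDrop p st.1 (p.getD (i+1) 0) st.2 st.2 with hrdef
  set K := if p.getD (i+1) 0 = p.getD r 0 then r + 1 else r with hKdef
  have hKk : K = pvMB p (i+1+1) := by
    apply le_antisymm
    · apply pvMB_le
      · rw [hk] at h1; omega
      · exact h2
    · rcases Nat.eq_zero_or_pos (pvMB p (i+1+1)) with h0 | hbpos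
      · omega
      · have hb := pvMB_spec p (i+1+1) (by omega)
        have hbm : pvMB p (i+1+1) - 1 < p.length := by omega
        have htb : p.take (pvMB p (i+1+1)) =
            p.take (pvMB p (i+1+1) - 1) ++ [p.getD (pvMB p (i+1+1) - 1) 0] := by
          have := pv_take_succ_getD p (pvMB p (i+1+1) - 1) hbm
          rwa [Nat.sub_add_cancel hbpos] at this
        have hdec := hb.2
        rw [htb, pv_take_succ_getD p (i+1) hi] at hdec
        obtain ⟨hsfx, hceq⟩ := (pv_snoc_suffix _ _ _ _).mp hdec
        have hb1 : pvMB p (i+1+1) - 1 ≤ st.2 := by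
          rw [hk]
          apply pvMB_le
          · omega
          · exact hsfx
        exact h3 (pvMB p (i+1+1)) (by omega) hb.2
  refine ⟨by simpa using hlen, hKk, ?_⟩
  intro j hj
  rcases Nat.lt_or_ge j (i+1) with hlt | hge
  · have hjl : j < st.1.length := by omega
    have : (st.1.set (i+1) K).getD j 0 = st.1.getD j 0 := by
      rw [List.getD_eq_getElem _ _ (by simpa using hjl), List.getD_eq_getElem _ _ hjl]
      exact List.getElem_set_ne (by omega) _
    rw [this]
    exact hentries j (by omega)
  · have hj' : j = i + 1 := by omega
    subst hj'
    have hjl : i + 1 < (st.1.set (i+1) K).length := by simpa [hlen] using hi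
    rw [List.getD_eq_getElem _ _ hjl, List.getElem_set_self]
    exact hKk

lemma pvKmpFailure_fold (p : List Int) :
    ∀ d, d + 1 ≤ p.length →
    pvFInv p d ((List.range' 1 d).foldl (pvKmpFailStep p) (List.replicate p.length 0, 0)) := by
  intro d
  induction d with
  | zero =>
    intro _
    have hmb1 : pvMB p 1 = 0 := by
      have := (pvMB_spec p 1 one_pos).1
      omega
    refine ⟨by simp, by simpa using hmb1.symm, ?_⟩
    intro j hj
    have hj0 : j = 0 := Nat.le_zero.mp hj
    subst hj0
    show (List.replicate p.length 0).getD 0 0 = pvMB p 1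
    rw [hmb1]
    simp only [List.getD, List.getElem?_replicate]
    split <;> rfl
  | succ d ih =>
    intro hd
    rw [List.range'_concat, List.foldl_append]
    simp only [List.foldl_cons, List.foldl_nil]
    have h1 : 1 + 1 * d = d + 1 := by omega
    rw [h1]
    exact pvFStep_inv p d _ (ih (by omega)) (by omega)

lemma pvKmpFailure_spec (p : List Int) (hp : p ≠ []) :
    ∀ j, 0 < j → j ≤ p.length → (pvKmpFailure p).getD (j-1) 0 = pvMB p j := by
  intro j hj0 hjm
  have hm : 0 < p.length := List.length_pos_of_ne_nil hp
  obtain ⟨_, _, hentries⟩ := pvKmpFailure_fold p (p.length - 1) (by omega)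
  have := hentries (j-1) (by omega)
  rwa [Nat.sub_add_cancel hj0] at this

lemma pv_infix_snoc {α : Type} (l s : List α) (c : α) :
    l <:+: s ++ [c] ↔ l <:+: s ∨ l <:+ s ++ [c] := by
  constructor
  · rintro ⟨u, v, huv⟩
    rcases List.eq_nil_or_concat v with rfl | ⟨v', c', rfl⟩
    · right
      exact ⟨u, by simpa [List.append_assoc] using huv⟩
    · left
      have h1 : (u ++ l ++ v') ++ [c'] = s ++ [c] := by
        simpa [List.concat_eq_append, List.append_assoc] using huv
      obtain ⟨h2, _⟩ := List.append_inj' h1 rfl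
      exact ⟨u, v', by simpa [List.append_assoc] using h2⟩
  · rintro (⟨u, v, huv⟩ | ⟨u, hu⟩)
    · exact ⟨u, v ++ [c], by rw [← huv]; simp [List.append_assoc]⟩
    · exact ⟨u, [], by simpa using hu⟩

-- invariant of the search fold: the flag says "an occurrence ended in s", and while the flag is
-- down the counter is the longest prefix of p that is a suffix of s
def pvSInv (p s : List Int) (st : Bool × Nat) : Prop :=
  (st.1 = true ↔ p <:+: s) ∧ (st.1 = false → (st.2 = pvMu p s ∧ st.2 < p.length))

lemma pvSearchStep_inv (p : List Int) (f : List Nat)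
    (hf : ∀ j, 0 < j → j ≤ p.length → f.getD (j-1) 0 = pvMB p j)
    (s : List Int) (c : Int) (st : Bool × Nat) (hinv : pvSInv p s st) :
    pvSInv p (s ++ [c]) (pvKmpSearchStep p f st c) := by
  obtain ⟨hfound, hnot⟩ := hinv
  by_cases hb : st.1 = true
  · simp only [pvKmpSearchStep, hb, if_true]
    constructor
    · constructor
      · intro _
        exact (hfound.mp hb).trans ⟨[], [c], by simp⟩
      · intro _; exact hb
    · intro h; rw [h] at hb; cases hb
  · have hb' : st.1 = false := by simpa using hb
    obtain ⟨hk, hklt⟩ := hnot hb'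
    have hks : p.take st.2 <:+ s := by rw [hk]; exact pvMu_suffix p s
    have hfr : ∀ j, 0 < j → j ≤ st.2 → f.getD (j-1) 0 = pvMB p j :=
      fun j h0 hj => hf j h0 (by omega)
    obtain ⟨h1, h2, h3⟩ := pvKmpStep_spec p f c s st.2 hklt hks hfr
    simp only [pvKmpSearchStep, hb', Bool.false_eq_true, if_false]
    set r := pvKmpDrop p f c st.2 st.2 with hrdef
    set K := if c = p.getD r 0 then r + 1 else r with hKdef
    have hKmu : K = pvMu p (s ++ [c]) := by
      apply le_antisymm
      · exact pvMu_ge p (s ++ [c]) K (by omega) h2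
      · rcases Nat.eq_zero_or_pos (pvMu p (s ++ [c])) with h0 | hμpos
        · omega
        · have hμm : pvMu p (s ++ [c]) ≤ p.length := pvMu_le p (s ++ [c])
          have hμ1 : pvMu p (s ++ [c]) - 1 < p.length := by omega
          have htμ : p.take (pvMu p (s ++ [c])) =
              p.take (pvMu p (s ++ [c]) - 1) ++ [p.getD (pvMu p (s ++ [c]) - 1) 0] := by
            have := pv_take_succ_getD p (pvMu p (s ++ [c]) - 1) hμ1
            rwa [Nat.sub_add_cancel hμpos] at this
          have hsfx := pvMu_suffix p (s ++ [c])
          rw [htμ] at hsfx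
          obtain ⟨hs1, hc1⟩ := (pv_snoc_suffix _ _ _ _).mp hsfx
          have hμk : pvMu p (s ++ [c]) - 1 ≤ st.2 := by
            rw [hk]; exact pvMu_ge p s _ (by omega) hs1
          exact h3 (pvMu p (s ++ [c])) (by omega) (pvMu_suffix p (s ++ [c]))
    by_cases hKm : K = p.length
    · rw [if_pos hKm]
      constructor
      · constructor
        · intro _
          have hsf : p.take K <:+ s ++ [c] := h2
          rw [hKm, List.take_length] at hsf
          exact hsf.isInfix
        · intro _; rfl
      · intro h; cases h
    · rw [if_neg hKm]
      constructor
      · constructor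
        · intro h; cases h
        · intro hinf
          exfalso
          rcases (pv_infix_snoc p s c).mp hinf with h | h
          · rw [← hfound] at h; rw [hb'] at h; cases h
          · have hle : p.length ≤ pvMu p (s ++ [c]) :=
              pvMu_ge p _ _ le_rfl (by simpa [List.take_length] using h)
            have heq : pvMu p (s ++ [c]) = p.length :=
              le_antisymm (pvMu_le _ _) hle
            rw [← hKmu] at heq
            exact hKm heq
      · intro _
        have hKle : K ≤ p.length := by rw [hKmu]; exact pvMu_le _ _
        exact ⟨hKmu, by omega⟩

lemma pvSearch_fold (p : List Int) (f : List Nat)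
    (hf : ∀ j, 0 < j → j ≤ p.length → f.getD (j-1) 0 = pvMB p j) :
    ∀ t s st, pvSInv p s st → pvSInv p (s ++ t) (t.foldl (pvKmpSearchStep p f) st) := by
  intro t
  induction t with
  | nil => intro s st h; simpa using h
  | cons c t ih =>
    intro s st h
    rw [List.foldl_cons]
    have := ih (s ++ [c]) _ (pvSearchStep_inv p f hf s c st h)
    simpa [List.append_assoc] using this

lemma pvKmpContains_spec (p t : List Int) (hp : p ≠ []) :
    pvKmpContains p t = true ↔ p <:+: t := by
  have hm : 0 < p.length := List.length_pos_of_ne_nil hp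
  have hf := pvKmpFailure_spec p hp
  have hinit : pvSInv p [] (false, 0) := by
    unfold pvSInv
    constructor
    · constructor
      · intro h; simp at h
      · intro h; exact absurd (List.infix_nil.mp h) hp
    · intro _
      refine ⟨?_, hm⟩
      symm
      have hμ := pvMu_suffix p []
      rcases List.take_eq_nil_iff.mp (List.suffix_nil.mp hμ) with h | h
      · exact h
      · exact absurd h hp
  have hfold := pvSearch_fold p (pvKmpFailure p) hf t [] (false, 0) hinit
  simp only [List.nil_append] at hfold
  show (t.foldl (pvKmpSearchStep p (pvKmpFailure p)) (false, 0)).1 = true ↔ p <:+: t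
  exact hfold.1

-- rotation ↔ substring of the doubled list (equal lengths, nonempty)
lemma pv_rot_iff_infix (l1 l2 : List Int) (hlen : l1.length = l2.length) (hne : l2 ≠ []) :
    (∃ j < l2.length, l1 = l2.rotate j) ↔ l1 <:+: l2 ++ l2 := by
  constructor
  · rintro ⟨j, hj, rfl⟩
    refine ⟨l2.take j, l2.drop j, ?_⟩
    rw [List.rotate_eq_drop_append_take (le_of_lt hj)]
    calc l2.take j ++ (l2.drop j ++ l2.take j) ++ l2.drop j
        = (l2.take j ++ l2.drop j) ++ (l2.take j ++ l2.drop j) := by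
          simp only [List.append_assoc]
      _ = l2 ++ l2 := by rw [List.take_append_drop]
  · rintro ⟨u, v, huv⟩
    have hlu : u.length ≤ l2.length := by
      have := congrArg List.length huv
      simp at this
      omega
    have hdrop : l1 ++ v = (l2 ++ l2).drop u.length := by
      rw [← huv, List.append_assoc, List.drop_left]
    have hl1 : l1 = ((l2 ++ l2).drop u.length).take l1.length := by
      rw [← hdrop, List.take_left]
    have hkey : ((l2 ++ l2).drop u.length).take l2.length = l2.rotate u.length := by
      rw [List.drop_append_of_le_length hlu, List.take_append]
      rw [List.take_of_length_le (by simp)]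
      rw [List.length_drop, Nat.sub_sub_self hlu]
      exact (List.rotate_eq_drop_append_take hlu).symm
    rcases Nat.lt_or_ge u.length l2.length with hlt | hge
    · exact ⟨u.length, hlt, by rw [hl1, hlen, hkey]⟩
    · have ha : u.length = l2.length := le_antisymm hlu hge
      refine ⟨0, List.length_pos_of_ne_nil hne, ?_⟩
      rw [List.rotate_zero, hl1, hlen, hkey, ha, List.rotate_length]

-- characterization of A (sorted gate + reversal + rotation scan)
lemma pv_A_char (l1 l2 : List Int) :
    is_same_hamilton_cycle l1 l2 = true ↔
      l1.Perm l2 ∧ (l1 = l2.reverse ∨ ∃ j < l1.length, l1 = l2.rotate j) := by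
  unfold is_same_hamilton_cycle
  rw [PySem.List.slice?_none_none_neg_one]
  by_cases hperm : l1.Perm l2
  · have hs : PySem.List.sorted l1 (fun x => x) false = PySem.List.sorted l2 (fun x => x) false :=
      (PySem.List.sorted_id_eq_sorted_id_iff_perm l1 l2).mpr hperm
    rw [if_neg (by simp [hs])]
    simp only [Option.getD_some]
    have hlen : l1.length = l2.length := hperm.length_eq
    by_cases hrev : l1 = l2.reverse
    · simp [hrev]
    · rw [if_neg (show ¬((l1 == l2.reverse) = true) by simp [hrev])]
      rw [List.any_eq_true]
      simp only [hperm, true_and, hrev, false_or]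
      constructor
      · rintro ⟨i, hi, hp⟩
        rw [PySem.List.mem_pyRange_one] at hi
        obtain ⟨h0, hlt⟩ := hi
        rw [PySem.List.slice_from l2 h0, PySem.List.slice_to l2 h0] at hp
        refine ⟨i.toNat, by omega, ?_⟩
        rw [List.rotate_eq_drop_append_take (by omega)]
        simpa using hp
      · rintro ⟨j, hj, hl⟩
        refine ⟨(j : Int), ?_, ?_⟩
        · rw [PySem.List.mem_pyRange_one]; constructor <;> [positivity; exact_mod_cast hj]
        · rw [PySem.List.slice_from l2 (by positivity), PySem.List.slice_to l2 (by positivity)]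
          simp only [Int.toNat_natCast]
          rw [List.rotate_eq_drop_append_take (by omega)] at hl
          simpa using hl
  · have hs : PySem.List.sorted l1 (fun x => x) false ≠ PySem.List.sorted l2 (fun x => x) false :=
      fun h => hperm ((PySem.List.sorted_id_eq_sorted_id_iff_perm l1 l2).mp h)
    rw [if_pos hs]
    simp [hperm]

-- characterization of B (length gate + reversal + KMP on the doubled list)
lemma pv_B_char (l1 l2 : List Int) :
    is_same_hamilton_cycle_alt l1 l2 = true ↔
      l1.length = l2.length ∧ (l1 = l2.reverse ∨ ∃ j < l2.length, l1 = l2.rotate j) := by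
  unfold is_same_hamilton_cycle_alt
  rw [PySem.List.slice?_none_none_neg_one]
  simp only [Option.getD_some]
  by_cases hlen : l1.length = l2.length
  · rw [if_neg (by simp [hlen])]
    by_cases hrev : l1 = l2.reverse
    · simp [hrev]
    · rw [if_neg (show ¬((l1 == l2.reverse) = true) by simp [hrev])]
      by_cases hl2 : l2 = []
      · subst hl2
        have hl1 : l1 = [] := List.length_eq_zero_iff.mp (by simpa using hlen)
        subst hl1
        simp at hrev
      · have hl1 : l1 ≠ [] := by
          intro h
          subst h
          exact hl2 (List.length_eq_zero_iff.mp (by simpa using hlen.symm))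
        rw [pvKmpContains_spec l1 (l2 ++ l2) hl1, ← pv_rot_iff_infix l1 l2 hlen hl2]
        simp [hlen, hrev]
  · rw [if_pos (by simpa using hlen)]
    simp [hlen]

-- ===== VERDICT (by name: the statement is the Claim_ definition above) =====
theorem is_same_hamilton_cycle_spec : Claim_equal_is_same_hamilton_cycle := by
  intro l1 l2 _
  unfold Spec_is_same_hamilton_cycle
  apply Bool.coe_iff_coe.mp
  rw [pv_A_char, pv_B_char]
  constructor
  · rintro ⟨hp, h⟩
    refine ⟨hp.length_eq, ?_⟩
    rcases h with h | ⟨j, hj, hl⟩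
    · exact Or.inl h
    · exact Or.inr ⟨j, by rw [← hp.length_eq]; exact hj, hl⟩
  · rintro ⟨hlen, h⟩
    have hp : l1.Perm l2 := by
      rcases h with h | ⟨j, _, hj⟩
      · rw [h]; exact (List.reverse_perm l2)
      · rw [hj]; exact (List.rotate_perm l2 j)
    refine ⟨hp, ?_⟩
    rcases h with h | ⟨j, hj, hl⟩
    · exact Or.inl h
    · exact Or.inr ⟨j, by rw [hlen]; exact hj, hl⟩
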